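-- pv_equiv track=rewrite | github.com/cs19d502/colab | pdf_to_st.py | convert_text_to_st
-- ===== SOURCE A (Python) =====
-- from typing import List
--
-- def split_rungs(text: str) -> List[List[str]]:
--     """Split extracted text into rungs of instruction list lines."""
--     rungs: List[List[str]] = []
--     current: List[str] = []
--     for raw_line in text.splitlines():
--         line = raw_line.strip()
--         if not line:
--             if current:
--                 rungs.append(current)
--                 current = []
--             continue
--         if line.lower().startswith(("rung", "network")):
--             if current:
--                 rungs.append(current)
--                 current = []
--             continue
--         current.append(line)
--     if current:
--         rungs.append(current)
--     return rungs
--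
-- def _parse_instruction(instr: str) -> (str, str):
--     """Parse an instruction list line into opcode and operand."""
--     parts = instr.split(maxsplit=1)
--     if not parts:
--         return "", ""
--     opcode = parts[0].upper()
--     operand = parts[1].strip() if len(parts) > 1 else ""
--     return opcode, operand
--
-- def rung_to_expression(rung: List[str]):
--     """Convert a rung to ST expression and coil assignment."""
--     expr_parts: List[str] = []
--     coil_assignment = None
--
--     for instr in rung:
--         op, operand = _parse_instruction(instr)
--         if op in {"LD", "LDP", "LDN"}:
--             if op == "LDN":
--                 expr_parts = [f"NOT {operand}"]
--             else:
--                 expr_parts = [operand]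
--         elif op in {"AND", "ANDP", "ANDN"}:
--             if op == "ANDN":
--                 expr_parts.append(f"AND NOT {operand}")
--             else:
--                 expr_parts.append(f"AND {operand}")
--         elif op in {"OR", "ORP", "ORN"}:
--             if op == "ORN":
--                 expr_parts.append(f"OR NOT {operand}")
--             else:
--                 expr_parts.append(f"OR {operand}")
--         elif op in {"OUT", "SET", "RST", "OUTNOT"}:
--             coil_assignment = (op, operand)
--         # additional instructions could be handled here
--
--     expr = " ".join(expr_parts)
--     return expr, coil_assignment
--
-- def rung_to_st(rung: List[str], index: int) -> str:
--     expr, coil_assign = rung_to_expression(rung)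
--     if not coil_assign:
--         return f"(* Rung {index}: no coil found *)"
--
--     opcode, coil = coil_assign
--     st_lines = [f"(* Rung {index} *)"]
--     if opcode == "OUT":
--         st_lines.append(f"{coil} := {expr};")
--     elif opcode == "OUTNOT":
--         st_lines.append(f"{coil} := NOT ({expr});")
--     elif opcode == "SET":
--         st_lines.append(f"IF {expr} THEN {coil} := TRUE; END_IF;")
--     elif opcode == "RST":
--         st_lines.append(f"IF {expr} THEN {coil} := FALSE; END_IF;")
--     else:
--         st_lines.append(f"(* Unsupported coil opcode {opcode} *)")
--     return "\n".join(st_lines)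
--
-- def convert_text_to_st(text: str) -> str:
--     rungs = split_rungs(text)
--     st_lines: List[str] = []
--     for i, rung in enumerate(rungs, 1):
--         st = rung_to_st(rung, i)
--         st_lines.append(st)
--         st_lines.append("")
--     return "\n".join(st_lines)
-- ===== SOURCE B (Python) =====
-- def convert_text_to_st(text: str) -> str:
--     """Streaming one-pass conversion: no intermediate list of rungs."""
--     out = []
--     rung_no = 0
--     expr_parts = []
--     coil = None
--     started = False
--
--     for raw in text.splitlines():
--         line = raw.strip()
--         low = line.lower()
--         if not line or low.startswith("rung") or low.startswith("network"):
--             if started: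
--                 rung_no += 1
--                 out.append(_emit(rung_no, expr_parts, coil))
--                 out.append("")
--                 expr_parts, coil, started = [], None, False
--             continue
--         parts = line.split(maxsplit=1)
--         op = parts[0].upper()
--         arg = parts[1].strip() if len(parts) > 1 else ""
--         if op == "LD" or op == "LDP":
--             expr_parts = [arg]
--         elif op == "LDN":
--             expr_parts = ["NOT " + arg]
--         elif op == "AND" or op == "ANDP":
--             expr_parts.append("AND " + arg)
--         elif op == "ANDN":
--             expr_parts.append("AND NOT " + arg)
--         elif op == "OR" or op == "ORP":
--             expr_parts.append("OR " + arg)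
--         elif op == "ORN":
--             expr_parts.append("OR NOT " + arg)
--         elif op in ("OUT", "SET", "RST", "OUTNOT"):
--             coil = (op, arg)
--         started = True
--
--     if started:
--         rung_no += 1
--         out.append(_emit(rung_no, expr_parts, coil))
--         out.append("")
--     return "\n".join(out)
--
--
-- def _emit(n, expr_parts, coil):
--     if coil is None:
--         return f"(* Rung {n}: no coil found *)"
--     op, c = coil
--     expr = " ".join(expr_parts)
--     if op == "OUT":
--         body = f"{c} := {expr};"
--     elif op == "OUTNOT":
--         body = f"{c} := NOT ({expr});"
--     elif op == "SET":
--         body = f"IF {expr} THEN {c} := TRUE; END_IF;"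
--     elif op == "RST":
--         body = f"IF {expr} THEN {c} := FALSE; END_IF;"
--     else:
--         body = f"(* Unsupported coil opcode {op} *)"
--     return f"(* Rung {n} *)\n{body}"
-- ===== Notes on version B (the rewrite author's own statement) =====
-- stated objective: alternative
-- what changed: Replaced the three-stage pipeline (split_rungs building a list of rung line-lists, then rung_to_expression, then rung_to_st per rung) by a single streaming pass over splitlines that maintains the current rung's expr_parts/coil/rung counter directly and emits each ST block the moment the rung closes, never materializing the list of rungs.
import Mathlib
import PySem

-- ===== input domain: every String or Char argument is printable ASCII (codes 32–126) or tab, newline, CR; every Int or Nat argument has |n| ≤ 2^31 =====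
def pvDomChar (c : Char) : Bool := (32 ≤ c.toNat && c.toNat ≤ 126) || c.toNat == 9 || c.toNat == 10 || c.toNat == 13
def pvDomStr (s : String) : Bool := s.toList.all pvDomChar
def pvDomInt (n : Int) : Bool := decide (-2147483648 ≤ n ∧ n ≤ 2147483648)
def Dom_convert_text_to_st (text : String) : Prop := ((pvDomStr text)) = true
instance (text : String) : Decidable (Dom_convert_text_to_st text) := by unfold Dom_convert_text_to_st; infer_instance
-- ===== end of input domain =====

-- B replaces A's three-stage pipeline (split into a list of rungs, then per-rung expression
-- and ST emission) by a single streaming pass that emits each ST block as the rung closes.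


-- ===== PORT A =====
-- split_rungs: fold over splitlines with (rungs, current)
def pvSplitStep (st : List (List String) × List String) (rawLine : String) :
    List (List String) × List String :=
  let line := PySem.Str.strip rawLine
  if line = "" then
    (if st.2 ≠ [] then (st.1 ++ [st.2], ([] : List String)) else st)
  else if PySem.Str.startswith (PySem.Str.lower line) "rung" ||
          PySem.Str.startswith (PySem.Str.lower line) "network" then
    (if st.2 ≠ [] then (st.1 ++ [st.2], ([] : List String)) else st)
  else
    (st.1, st.2 ++ [line])

def pvSplitRungs (text : String) : List (List String) :=
  let st := (PySem.Str.splitlines text).foldl pvSplitStep ([], [])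
  if st.2 ≠ [] then st.1 ++ [st.2] else st.1

-- _parse_instruction
def pvParseInstruction (instr : String) : String × String :=
  match PySem.Str.split₀Max instr 1 with
  | [] => ("", "")
  | p0 :: rest =>
    (PySem.Str.upper p0,
     match rest with
     | [] => ""
     | p1 :: _ => PySem.Str.strip p1)

-- one iteration of rung_to_expression's loop
def pvExprStep (st : List String × Option (String × String)) (instr : String) :
    List String × Option (String × String) :=
  let p := pvParseInstruction instr
  let op := p.1
  let operand := p.2
  if op = "LD" ∨ op = "LDP" ∨ op = "LDN" then
    if op = "LDN" then (["NOT " ++ operand], st.2) else ([operand], st.2)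
  else if op = "AND" ∨ op = "ANDP" ∨ op = "ANDN" then
    if op = "ANDN" then (st.1 ++ ["AND NOT " ++ operand], st.2)
    else (st.1 ++ ["AND " ++ operand], st.2)
  else if op = "OR" ∨ op = "ORP" ∨ op = "ORN" then
    if op = "ORN" then (st.1 ++ ["OR NOT " ++ operand], st.2)
    else (st.1 ++ ["OR " ++ operand], st.2)
  else if op = "OUT" ∨ op = "SET" ∨ op = "RST" ∨ op = "OUTNOT" then
    (st.1, some (op, operand))
  else st

def pvRungToExpression (rung : List String) : String × Option (String × String) :=
  let st := rung.foldl pvExprStep ([], none)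
  (PySem.Str.join " " st.1, st.2)

def pvRungToSt (rung : List String) (index : Int) : String :=
  let r := pvRungToExpression rung
  let expr := r.1
  match r.2 with
  | none => "(* Rung " ++ PySem.Int.toStr index ++ ": no coil found *)"
  | some (opcode, coil) =>
    let line2 :=
      if opcode = "OUT" then coil ++ " := " ++ expr ++ ";"
      else if opcode = "OUTNOT" then coil ++ " := NOT (" ++ expr ++ ");"
      else if opcode = "SET" then "IF " ++ expr ++ " THEN " ++ coil ++ " := TRUE; END_IF;"
      else if opcode = "RST" then "IF " ++ expr ++ " THEN " ++ coil ++ " := FALSE; END_IF;"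
      else "(* Unsupported coil opcode " ++ opcode ++ " *)"
    PySem.Str.join "\n" ["(* Rung " ++ PySem.Int.toStr index ++ " *)", line2]

-- for i, rung in enumerate(rungs, 1): st_lines.append(rung_to_st(rung, i)); st_lines.append("")
def pvEnumStep (acc : List String × Int) (rung : List String) : List String × Int :=
  (acc.1 ++ [pvRungToSt rung acc.2, ""], acc.2 + 1)

def convert_text_to_st (text : String) : String :=
  let rungs := pvSplitRungs text
  let stLines := (rungs.foldl pvEnumStep ([], 1)).1
  PySem.Str.join "\n" stLines

-- ===== PORT B =====
-- _emit: the ST block for one finished rung, from the streamed state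
def pvEmit (n : Int) (exprParts : List String) (coil : Option (String × String)) : String :=
  match coil with
  | none => "(* Rung " ++ PySem.Int.toStr n ++ ": no coil found *)"
  | some (op, c) =>
    let expr := PySem.Str.join " " exprParts
    let body :=
      if op = "OUT" then c ++ " := " ++ expr ++ ";"
      else if op = "OUTNOT" then c ++ " := NOT (" ++ expr ++ ");"
      else if op = "SET" then "IF " ++ expr ++ " THEN " ++ c ++ " := TRUE; END_IF;"
      else if op = "RST" then "IF " ++ expr ++ " THEN " ++ c ++ " := FALSE; END_IF;"
      else "(* Unsupported coil opcode " ++ op ++ " *)"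
    "(* Rung " ++ PySem.Int.toStr n ++ " *)\n" ++ body

-- streaming state: (out, rung_no, expr_parts, coil, started)
def pvAltStep (st : List String × Int × List String × Option (String × String) × Bool)
    (raw : String) : List String × Int × List String × Option (String × String) × Bool :=
  let (out, n, ep, coil, started) := st
  let line := PySem.Str.strip raw
  let low := PySem.Str.lower line
  if line = "" || PySem.Str.startswith low "rung" || PySem.Str.startswith low "network" then
    if started then (out ++ [pvEmit (n + 1) ep coil, ""], n + 1, [], none, false) else st
  else
    match PySem.Str.split₀Max line 1 with
    | [] => (out, n, ep, coil, true)  -- unreachable: a stripped nonempty line splits into ≥ 1 part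
    | p0 :: rest =>
      let op := PySem.Str.upper p0
      let arg := match rest with | [] => "" | p1 :: _ => PySem.Str.strip p1
      let epc :=
        if op = "LD" || op = "LDP" then ([arg], coil)
        else if op = "LDN" then (["NOT " ++ arg], coil)
        else if op = "AND" || op = "ANDP" then (ep ++ ["AND " ++ arg], coil)
        else if op = "ANDN" then (ep ++ ["AND NOT " ++ arg], coil)
        else if op = "OR" || op = "ORP" then (ep ++ ["OR " ++ arg], coil)
        else if op = "ORN" then (ep ++ ["OR NOT " ++ arg], coil)
        else if op = "OUT" || op = "SET" || op = "RST" || op = "OUTNOT" then (ep, some (op, arg))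
        else (ep, coil)
      (out, n, epc.1, epc.2, true)

def convert_text_to_st_alt (text : String) : String :=
  let st := (PySem.Str.splitlines text).foldl pvAltStep ([], 0, [], none, false)
  -- (out, rung_no, expr_parts, coil, started) := st; final flush if started
  let out := if st.2.2.2.2 then st.1 ++ [pvEmit (st.2.1 + 1) st.2.2.1 st.2.2.2.1, ""] else st.1
  PySem.Str.join "\n" out

-- ===== PRECONDITION & SPEC =====
def Spec_convert_text_to_st (text : String) (out : String) : Prop := out = convert_text_to_st_alt text
instance (text : String) (out : String) : Decidable (Spec_convert_text_to_st text out) := by unfold Spec_convert_text_to_st; infer_instance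

-- ===== CLAIM (what is proved, stated in full; the proofs are below) =====
def Claim_equal_convert_text_to_st : Prop := ∀ (text : String), Dom_convert_text_to_st text → Spec_convert_text_to_st text (convert_text_to_st text)

-- ===== LEMMAS AND PROOFS =====

-- proof-only: the blocks for a list of rungs, numbered from i
def pvEmitFrom (i : Int) : List (List String) → List String
  | [] => []
  | r :: rs => pvRungToSt r i :: "" :: pvEmitFrom (i + 1) rs

theorem pvEnum_eq_emitFrom (rungs : List (List String)) :
    ∀ (acc : List String) (i : Int),
      (rungs.foldl pvEnumStep (acc, i)).1 = acc ++ pvEmitFrom i rungs := by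
  induction rungs with
  | nil => intro acc i; simp [pvEmitFrom]
  | cons r rs ih =>
      intro acc i
      simp [List.foldl, pvEnumStep, ih, pvEmitFrom]

theorem pvJoinPair (a b : String) : PySem.Str.join "\n" [a, b] = a ++ "\n" ++ b := by
  show String.ofList (['\n'].intercalate [a.toList, b.toList]) = a ++ "\n" ++ b
  rw [show ['\n'].intercalate [a.toList, b.toList] = a.toList ++ "\n".toList ++ b.toList from by
    simp [List.intercalate]]
  rw [String.ofList_append, String.ofList_append, String.ofList_toList, String.ofList_toList,
    String.ofList_toList]

theorem pvSplitStep_append (rungs : List (List String)) (cur : List String) (l : String) :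
    pvSplitStep (rungs, cur) l =
      (rungs ++ (pvSplitStep ([], cur) l).1, (pvSplitStep ([], cur) l).2) := by
  simp only [pvSplitStep]
  split_ifs <;> simp_all

theorem pvSplitFold_append (ls : List String) :
    ∀ (rungs : List (List String)) (cur : List String),
      ls.foldl pvSplitStep (rungs, cur) =
        (rungs ++ (ls.foldl pvSplitStep ([], cur)).1, (ls.foldl pvSplitStep ([], cur)).2) := by
  induction ls with
  | nil => intro rungs cur; simp
  | cons l ls ih =>
      intro rungs cur
      simp only [List.foldl]
      rw [pvSplitStep_append rungs cur l, pvSplitStep_append [] cur l, List.nil_append]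
      rw [ih ((pvSplitStep ([], cur) l).1), ih (rungs ++ (pvSplitStep ([], cur) l).1)]
      simp

-- the streamed emit equals A's rung_to_st
theorem pvEmit_eq_rungToSt (rung : List String) (i : Int) :
    pvEmit i (rung.foldl pvExprStep ([], none)).1 (rung.foldl pvExprStep ([], none)).2
      = pvRungToSt rung i := by
  unfold pvEmit pvRungToSt pvRungToExpression
  cases h : (rung.foldl pvExprStep ([], none)).2 with
  | none => simp [h]
  | some oc =>
      obtain ⟨op, c⟩ := oc
      simp only [h]
      rw [pvJoinPair, show (" *)\n" : String) = " *)" ++ "\n" from rfl]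
      simp [String.append_assoc]

-- step lemmas: how each port's one-line step acts, by case on the line
theorem pvSplitStep_flush (rungs : List (List String)) (cur : List String) (l : String)
    (h : PySem.Str.strip l = "" ∨
      PySem.Str.startswith (PySem.Str.lower (PySem.Str.strip l)) "rung" = true ∨
      PySem.Str.startswith (PySem.Str.lower (PySem.Str.strip l)) "network" = true) :
    pvSplitStep (rungs, cur) l =
      (if cur ≠ [] then (rungs ++ [cur], ([] : List String)) else (rungs, cur)) := by
  simp only [pvSplitStep]
  by_cases hb : PySem.Str.strip l = ""
  · rw [if_pos hb]
  · have hcond : (PySem.Str.startswith (PySem.Str.lower (PySem.Str.strip l)) "rung" ||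
        PySem.Str.startswith (PySem.Str.lower (PySem.Str.strip l)) "network") = true := by
      rcases h with h | h | h
      exacts [absurd h hb, by rw [h]; rfl, by rw [h]; simp]
    rw [if_neg hb, if_pos hcond]

theorem pvSplitStep_content (rungs : List (List String)) (cur : List String) (l : String)
    (hb : ¬ PySem.Str.strip l = "")
    (hr : PySem.Str.startswith (PySem.Str.lower (PySem.Str.strip l)) "rung" = false)
    (hn : PySem.Str.startswith (PySem.Str.lower (PySem.Str.strip l)) "network" = false) :
    pvSplitStep (rungs, cur) l = (rungs, cur ++ [PySem.Str.strip l]) := by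
  simp only [pvSplitStep]
  rw [if_neg hb, if_neg (by simp only [hr, hn, Bool.or_self, Bool.false_eq_true,
    not_false_eq_true])]

theorem pvAltStep_flush (out : List String) (n : Int) (ep : List String)
    (coil : Option (String × String)) (b : Bool) (l : String)
    (h : PySem.Str.strip l = "" ∨
      PySem.Str.startswith (PySem.Str.lower (PySem.Str.strip l)) "rung" = true ∨
      PySem.Str.startswith (PySem.Str.lower (PySem.Str.strip l)) "network" = true) :
    pvAltStep (out, n, ep, coil, b) l =
      (if b then (out ++ [pvEmit (n + 1) ep coil, ""], n + 1, [], none, false)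
       else (out, n, ep, coil, b)) := by
  simp only [pvAltStep]
  rw [if_pos (by rcases h with h | h | h <;>
    simp only [h, decide_true, Bool.true_or, Bool.or_true])]

set_option maxHeartbeats 1000000 in
theorem pvAltStep_content (out : List String) (n : Int) (ep : List String)
    (coil : Option (String × String)) (b : Bool) (l : String)
    (hb : ¬ PySem.Str.strip l = "")
    (hr : PySem.Str.startswith (PySem.Str.lower (PySem.Str.strip l)) "rung" = false)
    (hn : PySem.Str.startswith (PySem.Str.lower (PySem.Str.strip l)) "network" = false) :
    pvAltStep (out, n, ep, coil, b) l =
      (out, n, (pvExprStep (ep, coil) (PySem.Str.strip l)).1,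
        (pvExprStep (ep, coil) (PySem.Str.strip l)).2, true) := by
  simp only [pvAltStep]
  rw [if_neg (by simp only [hr, hn, Bool.or_false, decide_eq_true_eq]; exact hb)]
  cases h : PySem.Str.split₀Max (PySem.Str.strip l) 1 with
  | nil => simp [pvExprStep, pvParseInstruction, h]
  | cons p0 rest =>
      simp only [pvExprStep, pvParseInstruction, h]
      split_ifs <;> simp_all

-- main streaming invariant: the streamed pass, started from the state A would have after
-- reading `cur`, produces A's remaining blocks
theorem pvMain (ls : List String) :
    ∀ (acc : List String) (n : Int) (cur : List String),
      (let st := ls.foldl pvAltStep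
          (acc, n, (cur.foldl pvExprStep ([], none)).1, (cur.foldl pvExprStep ([], none)).2,
            decide (cur ≠ []));
        if st.2.2.2.2 then st.1 ++ [pvEmit (st.2.1 + 1) st.2.2.1 st.2.2.2.1, ""] else st.1)
      = acc ++ pvEmitFrom (n + 1)
          (let sp := ls.foldl pvSplitStep ([], cur);
            if sp.2 ≠ [] then sp.1 ++ [sp.2] else sp.1) := by
  induction ls with
  | nil =>
      intro acc n cur
      by_cases hc : cur = []
      · simp [hc, pvEmitFrom]
      · simp only [List.foldl_nil, hc, ne_eq, not_false_eq_true, decide_true, if_pos]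
        rw [pvEmit_eq_rungToSt]
        simp [pvEmitFrom]
  | cons l ls ih =>
      intro acc n cur
      simp only [List.foldl_cons]
      by_cases hflush : PySem.Str.strip l = "" ∨
          PySem.Str.startswith (PySem.Str.lower (PySem.Str.strip l)) "rung" = true ∨
          PySem.Str.startswith (PySem.Str.lower (PySem.Str.strip l)) "network" = true
      · rw [pvAltStep_flush _ _ _ _ _ _ hflush, pvSplitStep_flush _ _ _ hflush]
        by_cases hc : cur = []
        · simp only [hc, ne_eq, not_true_eq_false, decide_false, if_false]
          have H := ih acc n []
          simpa using H
        · simp only [ne_eq, hc, not_false_eq_true, decide_true, if_pos]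
          have H := ih (acc ++ [pvEmit (n + 1) (cur.foldl pvExprStep ([], none)).1
            (cur.foldl pvExprStep ([], none)).2, ""]) (n + 1) []
          simp only [List.foldl_nil, ne_eq, not_true_eq_false, decide_false] at H
          rw [H]
          simp only [List.nil_append]
          rw [pvSplitFold_append ls [cur] []]
          by_cases h2 : (ls.foldl pvSplitStep ([], [])).2 = []
          · simp [h2, pvEmitFrom, pvEmit_eq_rungToSt]
          · simp [h2, pvEmitFrom, pvEmit_eq_rungToSt]
      · push_neg at hflush
        obtain ⟨hb, hr, hn⟩ := hflush
        rw [pvAltStep_content _ _ _ _ _ _ hb (by simpa using hr) (by simpa using hn),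
          pvSplitStep_content _ _ _ hb (by simpa using hr) (by simpa using hn)]
        have H := ih acc n (cur ++ [PySem.Str.strip l])
        rw [List.foldl_append] at H
        simpa using H

-- ===== VERDICT (by name: the statement is the Claim_ definition above) =====
theorem convert_text_to_st_spec : Claim_equal_convert_text_to_st := by
  unfold Claim_equal_convert_text_to_st Spec_convert_text_to_st
  intro text _
  have H := pvMain (PySem.Str.splitlines text) [] 0 []
  simp only [List.foldl_nil, ne_eq, not_true_eq_false, decide_false, List.nil_append] at H
  simp only [convert_text_to_st, convert_text_to_st_alt, pvSplitRungs]
  rw [pvEnum_eq_emitFrom, H]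
  norm_num
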